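-- pv_equiv track=rewrite | github.com/Jsyro/aoc2023 | 1/sol.py | get_2_digit_num
-- ===== SOURCE A (Python) =====
-- def get_2_digit_num(line):
--     first_digit = ''
--     last_digit = ''
--     for char in line:
--         if char.isdigit() and not first_digit:
--             first_digit = char
--         if char.isdigit():
--             last_digit = char
--     number = int(first_digit+last_digit)
--     return number
-- ===== SOURCE B (Python) =====
-- def get_2_digit_num(line):
--     first = ''
--     for char in line:
--         if char.isdigit():
--             first = char
--             break
--     last = ''
--     for char in reversed(line):
--         if char.isdigit():
--             last = char
--             break
--     return int(first) * 10 + int(last)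
-- ===== Notes on version B (the rewrite author's own statement) =====
-- stated objective: alternative
-- what changed: Replaces A's single full pass maintaining first/last boundary variables and a string-concatenation parse int(first+last) with two opposite-direction early-terminating scans and the arithmetic combination int(first)*10+int(last).
import Mathlib
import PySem

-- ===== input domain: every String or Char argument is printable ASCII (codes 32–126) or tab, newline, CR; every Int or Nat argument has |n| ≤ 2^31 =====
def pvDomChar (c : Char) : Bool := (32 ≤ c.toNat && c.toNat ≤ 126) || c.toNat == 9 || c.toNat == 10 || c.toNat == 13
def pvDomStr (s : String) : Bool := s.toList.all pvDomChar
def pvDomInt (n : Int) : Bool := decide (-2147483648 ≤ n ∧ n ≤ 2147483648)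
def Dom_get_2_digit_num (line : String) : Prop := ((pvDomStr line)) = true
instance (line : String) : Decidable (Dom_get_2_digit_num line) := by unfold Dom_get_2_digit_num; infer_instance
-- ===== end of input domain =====

-- B replaces A's single full pass with two opposite-direction early-terminating scans
-- combined arithmetically (int(first)*10+int(last)); alternative decomposition, same cost.


-- ===== PORT A =====
-- single pass keeping first_digit/last_digit as (possibly empty) strings, then int(first+last)
def get_2_digit_num (line : String) : Int :=
  let st := line.toList.foldl (fun (st : List Char × List Char) c =>
    (if PySem.Chars.isdigit c && st.1.isEmpty then [c] else st.1,
     if PySem.Chars.isdigit c then [c] else st.2)) ([], [])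
  (PySem.Int.ofChars? (st.1 ++ st.2)).getD 0   -- Pre_ excludes the none (ValueError) case

-- ===== PORT B =====
-- forward loop with break: first digit char (as a 0/1-char string), '' if none
def pvFindDigit : List Char → List Char
  | [] => []
  | c :: cs => if PySem.Chars.isdigit c then [c] else pvFindDigit cs

def get_2_digit_num_alt (line : String) : Int :=
  let first := pvFindDigit line.toList
  let last := pvFindDigit line.toList.reverse
  (PySem.Int.ofChars? first).getD 0 * 10 + (PySem.Int.ofChars? last).getD 0

-- ===== PRECONDITION & SPEC =====
-- Pre_ excludes exactly the lines containing no ASCII digit; there both A and B raise ValueError.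
def Pre_get_2_digit_num (line : String) : Prop :=
  line.toList.any PySem.Chars.isdigit = true
instance (line : String) : Decidable (Pre_get_2_digit_num line) := by
  unfold Pre_get_2_digit_num; infer_instance

def pvWitness_get_2_digit_num : String := "a1b2c"

def Spec_get_2_digit_num (line : String) (out : Int) : Prop := out = get_2_digit_num_alt line
instance (line : String) (out : Int) : Decidable (Spec_get_2_digit_num line out) := by unfold Spec_get_2_digit_num; infer_instance

-- ===== CLAIM (what is proved, stated in full; the proofs are below) =====
def Claim_equal_get_2_digit_num : Prop := ∀ (line : String), Dom_get_2_digit_num line → Pre_get_2_digit_num line → Spec_get_2_digit_num line (get_2_digit_num line)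

-- ===== LEMMAS AND PROOFS =====

-- A's pair fold splits into two independent folds
theorem pvFoldPair (cs : List Char) (f0 l0 : List Char) :
    cs.foldl (fun (st : List Char × List Char) c =>
      (if PySem.Chars.isdigit c && st.1.isEmpty then [c] else st.1,
       if PySem.Chars.isdigit c then [c] else st.2)) (f0, l0)
    = (cs.foldl (fun f c => if PySem.Chars.isdigit c && f.isEmpty then [c] else f) f0,
       cs.foldl (fun l c => if PySem.Chars.isdigit c then [c] else l) l0) := by
  induction cs generalizing f0 l0 with
  | nil => rfl
  | cons c cs ih =>
    simp only [List.foldl_cons]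
    exact ih _ _

theorem pvFindDigit_append (xs ys : List Char) :
    pvFindDigit (xs ++ ys) = if xs.any PySem.Chars.isdigit then pvFindDigit xs else pvFindDigit ys := by
  induction xs with
  | nil => simp
  | cons c cs ih =>
    by_cases h : PySem.Chars.isdigit c <;> simp only [List.cons_append, pvFindDigit, h, List.any_cons, if_true, Bool.true_or, Bool.false_or, ih]
    simp

theorem pvFoldFirst (cs : List Char) (f0 : List Char) :
    cs.foldl (fun f c => if PySem.Chars.isdigit c && f.isEmpty then [c] else f) f0
    = if f0.isEmpty then pvFindDigit cs else f0 := by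
  induction cs generalizing f0 with
  | nil => split <;> simp_all [pvFindDigit]
  | cons c cs ih =>
    simp only [List.foldl_cons]
    rw [ih]
    by_cases h0 : f0.isEmpty
    · have hf0 : f0 = [] := List.isEmpty_iff.mp h0
      subst hf0
      by_cases h : PySem.Chars.isdigit c
      · simp [pvFindDigit, h]
      · simp [pvFindDigit, h]
    · simp [h0]

theorem pvFoldLast (cs : List Char) (l0 : List Char) :
    cs.foldl (fun l c => if PySem.Chars.isdigit c then [c] else l) l0
    = if cs.any PySem.Chars.isdigit then pvFindDigit cs.reverse else l0 := by
  induction cs generalizing l0 with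
  | nil => simp
  | cons c cs ih =>
    simp only [List.foldl_cons]
    rw [ih]
    simp only [List.reverse_cons, pvFindDigit_append, List.any_cons, List.any_reverse]
    by_cases hcs : cs.any PySem.Chars.isdigit <;>
      by_cases h : PySem.Chars.isdigit c <;>
        simp [hcs, h, pvFindDigit]

theorem pvFindDigit_of_any (cs : List Char) (h : cs.any PySem.Chars.isdigit = true) :
    ∃ a, pvFindDigit cs = [a] ∧ PySem.Chars.isdigit a = true := by
  induction cs with
  | nil => simp at h
  | cons c cs ih =>
    by_cases hc : PySem.Chars.isdigit c
    · exact ⟨c, by simp [pvFindDigit, hc], hc⟩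
    · have hc' : PySem.Chars.isdigit c = false := by simpa using hc
      rw [List.any_cons, hc', Bool.false_or] at h
      obtain ⟨a, ha, hd⟩ := ih h
      exact ⟨a, by simp [pvFindDigit, hc, ha], hd⟩

theorem pvDigitCases (a : Char) (h : PySem.Chars.isdigit a = true) :
    a = '0' ∨ a = '1' ∨ a = '2' ∨ a = '3' ∨ a = '4' ∨ a = '5' ∨ a = '6' ∨ a = '7' ∨ a = '8' ∨ a = '9' := by
  simp only [PySem.Chars.isdigit, Bool.and_eq_true, decide_eq_true_eq] at h
  obtain ⟨h1, h2⟩ := h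
  have hv1 : ('0').val ≤ a.val := h1
  have hv2 : a.val ≤ ('9').val := h2
  have l1 : (48 : Nat) ≤ a.val.toNat := hv1
  have l2 : a.val.toNat ≤ 57 := hv2
  have : a.val.toNat = 48 ∨ a.val.toNat = 49 ∨ a.val.toNat = 50 ∨ a.val.toNat = 51 ∨
      a.val.toNat = 52 ∨ a.val.toNat = 53 ∨ a.val.toNat = 54 ∨ a.val.toNat = 55 ∨
      a.val.toNat = 56 ∨ a.val.toNat = 57 := by omega
  have e : ∀ (b : Char), a.val.toNat = b.val.toNat → a = b :=
    fun b hb => Char.ext (UInt32.toNat_inj.mp hb)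
  rcases this with h|h|h|h|h|h|h|h|h|h
  · exact .inl (e '0' h)
  · exact .inr (.inl (e '1' h))
  · exact .inr (.inr (.inl (e '2' h)))
  · exact .inr (.inr (.inr (.inl (e '3' h))))
  · exact .inr (.inr (.inr (.inr (.inl (e '4' h)))))
  · exact .inr (.inr (.inr (.inr (.inr (.inl (e '5' h))))))
  · exact .inr (.inr (.inr (.inr (.inr (.inr (.inl (e '6' h)))))))
  · exact .inr (.inr (.inr (.inr (.inr (.inr (.inr (.inl (e '7' h))))))))
  · exact .inr (.inr (.inr (.inr (.inr (.inr (.inr (.inr (.inl (e '8' h)))))))))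
  · exact .inr (.inr (.inr (.inr (.inr (.inr (.inr (.inr (.inr (e '9' h)))))))))

theorem pvTwoDigit (a b : Char) (ha : PySem.Chars.isdigit a = true) (hb : PySem.Chars.isdigit b = true) :
    (PySem.Int.ofChars? ([a] ++ [b])).getD 0
      = (PySem.Int.ofChars? [a]).getD 0 * 10 + (PySem.Int.ofChars? [b]).getD 0 := by
  rcases pvDigitCases a ha with h|h|h|h|h|h|h|h|h|h <;> subst h <;>
    (rcases pvDigitCases b hb with h|h|h|h|h|h|h|h|h|h <;> subst h <;> decide)

-- ===== VERDICT (by name: the statement is the Claim_ definition above) =====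
theorem get_2_digit_num_spec : Claim_equal_get_2_digit_num := by
  intro line _ hpre
  unfold Spec_get_2_digit_num get_2_digit_num get_2_digit_num_alt
  have hpre' : line.toList.any PySem.Chars.isdigit = true := hpre
  rw [pvFoldPair, pvFoldFirst, pvFoldLast]
  simp only [List.isEmpty_nil, hpre', if_pos]
  obtain ⟨a, hfa, hda⟩ := pvFindDigit_of_any line.toList hpre'
  obtain ⟨b, hfb, hdb⟩ := pvFindDigit_of_any line.toList.reverse (by simpa [List.any_reverse] using hpre')
  rw [hfa, hfb]
  exact pvTwoDigit a b hda hdb
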